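-- pv_equiv track=rewrite | github.com/Chuckyecheesy/SpeedRay-Accelerate-Chest-X-Ray-Diagnosis | backend/ai_agents/diagnostic_summary.py | _normalize_condition_name
-- ===== SOURCE A (Python) =====
-- from typing import Any, Dict
--
-- CONDITION_SUMMARIES: Dict[str, Dict[str, str]] = {
--     "Atelectasis": {
--         "explanation": "Atelectasis is collapse or incomplete expansion of lung tissue. On X-ray it may show volume loss, shifted fissures, opacity, or crowded vessels. Common causes include mucus plug, foreign body, or compression.",
--         "recommended_next_steps": "Clinical correlation; consider chest physiotherapy or bronchoscopy if persistent. Follow-up X-ray to confirm resolution.",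
--     },
--     "Consolidation": {
--         "explanation": "Consolidation is airspace opacification, often with air bronchograms, indicating filling of alveoli. It can represent pneumonia, edema, or hemorrhage.",
--         "recommended_next_steps": "Correlate with symptoms and labs. Consider sputum culture and antibiotics if infection suspected. Follow-up imaging in 6–8 weeks if no improvement.",
--     },
--     "Infiltration": {
--         "explanation": "Infiltration is a non-specific parenchymal opacity on X-ray. It may represent pneumonia, atelectasis, or other parenchymal process.",
--         "recommended_next_steps": "Clinical correlation and repeat imaging. Further workup (e.g., CT) if persistent or worsening.",
--     },
--     "Pneumothorax": {
--         "explanation": "Pneumothorax is air in the pleural space. X-ray may show absent lung markings and a visible visceral pleural edge; tension pneumothorax can cause mediastinal shift.",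
--         "recommended_next_steps": "Assess stability and oxygen saturation. Large or symptomatic pneumothorax may require chest tube; small stable cases may be observed with follow-up X-ray.",
--     },
--     "Edema": {
--         "explanation": "Pulmonary edema appears as interstitial or alveolar opacities, Kerley lines, peribronchial cuffing, and often cardiomegaly or pleural effusions, typically bilateral.",
--         "recommended_next_steps": "Assess volume status and cardiac function. Consider diuretics, oxygen, and treatment of underlying cause (e.g., heart failure). BNP and echocardiography if indicated.",
--     },
--     "Emphysema": {
--         "explanation": "Emphysema on X-ray shows hyperlucency, flattened hemidiaphragms, increased retrosternal space, and possibly bullae with attenuated vessels—a chronic obstructive pattern.",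
--         "recommended_next_steps": "Spirometry to confirm COPD. Optimize inhaler therapy; smoking cessation; vaccination. Consider pulmonary rehab.",
--     },
--     "Fibrosis": {
--         "explanation": "Fibrosis appears as reticular or honeycomb opacities with volume loss and traction. It may be basilar or diffuse and suggests chronic parenchymal scarring.",
--         "recommended_next_steps": "HRCT for pattern characterization. Consider rheumatology or pulmonology referral; exclude drug-induced or occupational causes.",
--     },
--     "Effusion": {
--         "explanation": "Pleural effusion on X-ray shows blunted costophrenic angle and meniscus sign. It can be transudate (e.g., heart failure) or exudate (infection, malignancy).",
--         "recommended_next_steps": "Assess size and symptoms. Consider thoracentesis for diagnostic or therapeutic purposes. Treat underlying cause.",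
--     },
--     "Pneumonia": {
--         "explanation": "Pneumonia on X-ray shows focal or multifocal consolidation, air bronchograms, and possibly parapneumonic effusion in lobar or bronchopneumonic pattern.",
--         "recommended_next_steps": "Correlate with clinical picture; cultures and antibiotics per guidelines. Follow-up X-ray in 6–8 weeks to confirm resolution.",
--     },
--     "Pleural_Thickening": {
--         "explanation": "Pleural thickening is smooth or nodular pleural opacity, often apical or along the chest wall. It can be benign (prior infection) or related to asbestos or malignancy.",
--         "recommended_next_steps": "Compare with prior imaging. If new or changing, consider CT and clinical workup for malignancy or asbestos exposure.",
--     },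
--     "Cardiomegaly": {
--         "explanation": "Cardiomegaly is an enlarged cardiac silhouette on X-ray (e.g., cardiothoracic ratio > 0.5), which may reflect chamber enlargement, pericardial effusion, or mediastinal mass.",
--         "recommended_next_steps": "Echocardiography to assess function and chamber size. Evaluate for heart failure, valvular disease, or pericardial effusion.",
--     },
--     "Nodule": {
--         "explanation": "A nodule is a rounded opacity generally under 3 cm. Characterization depends on size, margins, and calcification; many are benign but require follow-up.",
--         "recommended_next_steps": "Compare with prior imaging. Follow Fleischner or similar guidelines; consider CT for characterization and interval follow-up.",
--     },
--     "Mass": {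
--         "explanation": "A mass is an opacity greater than 3 cm on X-ray. It requires further characterization; differential includes malignancy, granuloma, and round pneumonia.",
--         "recommended_next_steps": "CT chest for characterization. Consider biopsy or PET if malignancy suspected. Multidisciplinary review as appropriate.",
--     },
--     "Hernia": {
--         "explanation": "Diaphragmatic hernia may show bowel or stomach in the thorax and abnormal diaphragmatic contour; hiatal hernia may show retrocardiac air-fluid level.",
--         "recommended_next_steps": "Correlate with symptoms. Consider upper GI series or CT for anatomy. Surgical referral if symptomatic or complicated.",
--     },
-- }
--
-- def _normalize_condition_name(name: str) -> str:
--     """Match model output to our keys (e.g. 'Pleural Thickening' -> 'Pleural_Thickening')."""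
--     if not name or not name.strip():
--         return "Finding"
--     normalized = name.strip().replace(" ", "_")
--     if normalized in CONDITION_SUMMARIES:
--         return normalized
--     with_spaces = name.strip()
--     if with_spaces in CONDITION_SUMMARIES:
--         return with_spaces
--     for key in CONDITION_SUMMARIES:
--         if key.replace("_", " ") == with_spaces or key == normalized:
--             return key
--     return "Finding"
-- ===== SOURCE B (Python) =====
-- # B: one normalization pass + a single frozenset membership test.
-- # Correctness: every canonical key is space-free, so strip+replace(' ','_') is the
-- # unique candidate; A's extra membership test and fallback scan can never fire
-- # on any input where this candidate is not already a key.
-- _KEYS = frozenset([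
--     "Atelectasis", "Consolidation", "Infiltration", "Pneumothorax", "Edema",
--     "Emphysema", "Fibrosis", "Effusion", "Pneumonia", "Pleural_Thickening",
--     "Cardiomegaly", "Nodule", "Mass", "Hernia",
-- ])
--
--
-- def _normalize_condition_name(name: str) -> str:
--     """Match model output to our keys (e.g. 'Pleural Thickening' -> 'Pleural_Thickening')."""
--     candidate = name.strip().replace(" ", "_")
--     return candidate if candidate in _KEYS else "Finding"
-- ===== Notes on version B (the rewrite author's own statement) =====
-- stated objective: simpler
-- what changed: Replaces A's guard, two dict-membership tests and linear fallback scan over CONDITION_SUMMARIES with a single normalization (strip + replace spaces with underscores) followed by one frozenset membership test; since every key is space-free, A's later checks and scan can never succeed when that one test fails.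
import Mathlib
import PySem

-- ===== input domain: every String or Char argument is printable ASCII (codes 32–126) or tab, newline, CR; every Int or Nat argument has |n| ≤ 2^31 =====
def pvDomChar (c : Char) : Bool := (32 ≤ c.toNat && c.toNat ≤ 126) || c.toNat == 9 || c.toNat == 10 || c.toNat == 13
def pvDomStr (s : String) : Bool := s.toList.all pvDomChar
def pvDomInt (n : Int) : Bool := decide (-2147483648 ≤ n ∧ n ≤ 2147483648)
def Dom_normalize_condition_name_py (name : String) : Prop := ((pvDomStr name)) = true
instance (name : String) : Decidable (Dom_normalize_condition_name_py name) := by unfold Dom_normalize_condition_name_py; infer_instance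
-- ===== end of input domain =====

-- B replaces A's guard + two membership tests + linear fallback scan with one
-- normalization pass and a single key-set membership test; return values are equal.

-- ===== PORT A =====
def CONDITION_SUMMARIES : PySem.Dict String (PySem.Dict String String) :=
  PySem.Dict.mk [
    ("Atelectasis", PySem.Dict.mk [("explanation", "Atelectasis is collapse or incomplete expansion of lung tissue. On X-ray it may show volume loss, shifted fissures, opacity, or crowded vessels. Common causes include mucus plug, foreign body, or compression."), ("recommended_next_steps", "Clinical correlation; consider chest physiotherapy or bronchoscopy if persistent. Follow-up X-ray to confirm resolution.")]),
    ("Consolidation", PySem.Dict.mk [("explanation", "Consolidation is airspace opacification, often with air bronchograms, indicating filling of alveoli. It can represent pneumonia, edema, or hemorrhage."), ("recommended_next_steps", "Correlate with symptoms and labs. Consider sputum culture and antibiotics if infection suspected. Follow-up imaging in 6–8 weeks if no improvement.")]),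
    ("Infiltration", PySem.Dict.mk [("explanation", "Infiltration is a non-specific parenchymal opacity on X-ray. It may represent pneumonia, atelectasis, or other parenchymal process."), ("recommended_next_steps", "Clinical correlation and repeat imaging. Further workup (e.g., CT) if persistent or worsening.")]),
    ("Pneumothorax", PySem.Dict.mk [("explanation", "Pneumothorax is air in the pleural space. X-ray may show absent lung markings and a visible visceral pleural edge; tension pneumothorax can cause mediastinal shift."), ("recommended_next_steps", "Assess stability and oxygen saturation. Large or symptomatic pneumothorax may require chest tube; small stable cases may be observed with follow-up X-ray.")]),
    ("Edema", PySem.Dict.mk [("explanation", "Pulmonary edema appears as interstitial or alveolar opacities, Kerley lines, peribronchial cuffing, and often cardiomegaly or pleural effusions, typically bilateral."), ("recommended_next_steps", "Assess volume status and cardiac function. Consider diuretics, oxygen, and treatment of underlying cause (e.g., heart failure). BNP and echocardiography if indicated.")]),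
    ("Emphysema", PySem.Dict.mk [("explanation", "Emphysema on X-ray shows hyperlucency, flattened hemidiaphragms, increased retrosternal space, and possibly bullae with attenuated vessels—a chronic obstructive pattern."), ("recommended_next_steps", "Spirometry to confirm COPD. Optimize inhaler therapy; smoking cessation; vaccination. Consider pulmonary rehab.")]),
    ("Fibrosis", PySem.Dict.mk [("explanation", "Fibrosis appears as reticular or honeycomb opacities with volume loss and traction. It may be basilar or diffuse and suggests chronic parenchymal scarring."), ("recommended_next_steps", "HRCT for pattern characterization. Consider rheumatology or pulmonology referral; exclude drug-induced or occupational causes.")]),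
    ("Effusion", PySem.Dict.mk [("explanation", "Pleural effusion on X-ray shows blunted costophrenic angle and meniscus sign. It can be transudate (e.g., heart failure) or exudate (infection, malignancy)."), ("recommended_next_steps", "Assess size and symptoms. Consider thoracentesis for diagnostic or therapeutic purposes. Treat underlying cause.")]),
    ("Pneumonia", PySem.Dict.mk [("explanation", "Pneumonia on X-ray shows focal or multifocal consolidation, air bronchograms, and possibly parapneumonic effusion in lobar or bronchopneumonic pattern."), ("recommended_next_steps", "Correlate with clinical picture; cultures and antibiotics per guidelines. Follow-up X-ray in 6–8 weeks to confirm resolution.")]),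
    ("Pleural_Thickening", PySem.Dict.mk [("explanation", "Pleural thickening is smooth or nodular pleural opacity, often apical or along the chest wall. It can be benign (prior infection) or related to asbestos or malignancy."), ("recommended_next_steps", "Compare with prior imaging. If new or changing, consider CT and clinical workup for malignancy or asbestos exposure.")]),
    ("Cardiomegaly", PySem.Dict.mk [("explanation", "Cardiomegaly is an enlarged cardiac silhouette on X-ray (e.g., cardiothoracic ratio > 0.5), which may reflect chamber enlargement, pericardial effusion, or mediastinal mass."), ("recommended_next_steps", "Echocardiography to assess function and chamber size. Evaluate for heart failure, valvular disease, or pericardial effusion.")]),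
    ("Nodule", PySem.Dict.mk [("explanation", "A nodule is a rounded opacity generally under 3 cm. Characterization depends on size, margins, and calcification; many are benign but require follow-up."), ("recommended_next_steps", "Compare with prior imaging. Follow Fleischner or similar guidelines; consider CT for characterization and interval follow-up.")]),
    ("Mass", PySem.Dict.mk [("explanation", "A mass is an opacity greater than 3 cm on X-ray. It requires further characterization; differential includes malignancy, granuloma, and round pneumonia."), ("recommended_next_steps", "CT chest for characterization. Consider biopsy or PET if malignancy suspected. Multidisciplinary review as appropriate.")]),
    ("Hernia", PySem.Dict.mk [("explanation", "Diaphragmatic hernia may show bowel or stomach in the thorax and abnormal diaphragmatic contour; hiatal hernia may show retrocardiac air-fluid level."), ("recommended_next_steps", "Correlate with symptoms. Consider upper GI series or CT for anatomy. Surgical referral if symptomatic or complicated.")])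
  ]

-- Port of A's _normalize_condition_name
def normalize_condition_name_py (name : String) : String :=
  if name = "" ∨ PySem.Str.strip name = "" then "Finding"
  else
    let normalized := PySem.Str.replace (PySem.Str.strip name) " " "_"
    if CONDITION_SUMMARIES.contains normalized then normalized
    else
      let with_spaces := PySem.Str.strip name
      if CONDITION_SUMMARIES.contains with_spaces then with_spaces
      else
        match CONDITION_SUMMARIES.keys.find? (fun key =>
            PySem.Str.replace key "_" " " == with_spaces || key == normalized) with
        | some key => key
        | none => "Finding"

-- ===== PORT B =====
-- Source B's module-level frozenset literal of the 14 canonical keys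
def pvKEYS : PySem.Set String :=
  PySem.Set.ofList
    ["Atelectasis", "Consolidation", "Infiltration", "Pneumothorax", "Edema",
     "Emphysema", "Fibrosis", "Effusion", "Pneumonia", "Pleural_Thickening",
     "Cardiomegaly", "Nodule", "Mass", "Hernia"]

def normalize_condition_name_py_alt (name : String) : String :=
  let candidate := PySem.Str.replace (PySem.Str.strip name) " " "_"
  if PySem.Set.contains pvKEYS candidate then candidate else "Finding"

-- ===== PRECONDITION & SPEC =====
def Spec_normalize_condition_name_py (name : String) (out : String) : Prop := out = normalize_condition_name_py_alt name
instance (name : String) (out : String) : Decidable (Spec_normalize_condition_name_py name out) := by unfold Spec_normalize_condition_name_py; infer_instance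

-- ===== CLAIM (what is proved, stated in full; the proofs are below) =====
def Claim_equal_normalize_condition_name_py : Prop := ∀ (name : String), Dom_normalize_condition_name_py name → Spec_normalize_condition_name_py name (normalize_condition_name_py name)

-- ===== LEMMAS AND PROOFS =====

-- the 14 canonical keys, = CONDITION_SUMMARIES.keys = pvKEYS (as a list)
def pvKeys : List String :=
  ["Atelectasis", "Consolidation", "Infiltration", "Pneumothorax", "Edema", "Emphysema",
   "Fibrosis", "Effusion", "Pneumonia", "Pleural_Thickening", "Cardiomegaly", "Nodule",
   "Mass", "Hernia"]

theorem pv_keys_eq : CONDITION_SUMMARIES.keys = pvKeys := by decide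

theorem pv_set_eq : pvKEYS = pvKeys := by decide

-- every canonical key is space-free, so the ' '→'_' replacement fixes it
theorem pv_key_fix : ∀ x ∈ pvKeys, PySem.Str.replace x " " "_" = x := by decide

-- the '_'→' ' space-form of a key either is the key itself or is "Pleural Thickening"
theorem pv_key_space : ∀ x ∈ pvKeys,
    PySem.Str.replace x "_" " " = x ∨ x = "Pleural_Thickening" := by decide

theorem pv_PT : PySem.Str.replace "Pleural Thickening" " " "_" = "Pleural_Thickening" := by decide

-- core equality on the stripped string s (A's body past the guard vs B's body)
theorem pv_core (s : String) :
    (let normalized := PySem.Str.replace s " " "_"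
     if CONDITION_SUMMARIES.contains normalized then normalized
     else
       if CONDITION_SUMMARIES.contains s then s
       else
         match CONDITION_SUMMARIES.keys.find? (fun key =>
             PySem.Str.replace key "_" " " == s || key == normalized) with
         | some key => key
         | none => "Finding")
    = (if PySem.Set.contains pvKEYS (PySem.Str.replace s " " "_")
       then PySem.Str.replace s " " "_" else "Finding") := by
  set n := PySem.Str.replace s " " "_" with hn
  by_cases h1 : n ∈ pvKeys
  · have hc : CONDITION_SUMMARIES.contains n = true := by
      rw [PySem.Dict.contains_eq_decide_mem_keys, pv_keys_eq]; simpa using h1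
    simp [hc, pv_set_eq, h1]
  · have hc : CONDITION_SUMMARIES.contains n = false := by
      rw [PySem.Dict.contains_eq_decide_mem_keys, pv_keys_eq]; simpa using h1
    have hsK : s ∉ pvKeys := by
      intro h
      exact h1 (by rw [hn, pv_key_fix s h]; exact h)
    have hcs : CONDITION_SUMMARIES.contains s = false := by
      rw [PySem.Dict.contains_eq_decide_mem_keys, pv_keys_eq]; simpa using hsK
    have hfind : CONDITION_SUMMARIES.keys.find? (fun key =>
        PySem.Str.replace key "_" " " == s || key == n) = none := by
      rw [pv_keys_eq]
      apply List.find?_eq_none.mpr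
      intro k hk
      simp only [Bool.or_eq_true, beq_iff_eq, not_or]
      refine ⟨?_, fun he => h1 (he ▸ hk)⟩
      intro he
      rcases pv_key_space k hk with h | h
      · have hks : k = s := by rw [← h, he]
        exact hsK (hks ▸ hk)
      · subst h
        have hsPT : s = "Pleural Thickening" := by
          simpa using he.symm
        apply h1
        rw [hn, hsPT, pv_PT]
        exact hk
    simp [hc, hcs, hfind, pv_set_eq, h1]

-- ===== VERDICT (by name: the statement is the Claim_ definition above) =====
theorem normalize_condition_name_py_spec : Claim_equal_normalize_condition_name_py := by
  intro name _
  show normalize_condition_name_py name = normalize_condition_name_py_alt name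
  by_cases h0 : PySem.Str.strip name = ""
  · rw [normalize_condition_name_py, normalize_condition_name_py_alt, if_pos (Or.inr h0), h0]
    decide
  · have hname : name ≠ "" := fun h => h0 (by rw [h]; decide)
    have h := pv_core (PySem.Str.strip name)
    rw [normalize_condition_name_py, normalize_condition_name_py_alt,
      if_neg (by simp [hname, h0])]
    exact h
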